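-- pv_equiv track=rewrite | github.com/AryanG01/neetcode-submissions-qgc8oec4 | Data Structures & Algorithms/4-keys-keyboard/submission-0.py | maxA
-- ===== SOURCE A (Python) =====
-- def maxA(n: int) -> int:
--     if n <= 6:
--         return n
--
--     dp = [0] * (n + 1)
--
--     for i in range(1, 7):
--         dp[i] = i
--
--     for i in range(7, n + 1):
--         dp[i] = dp[i - 1] + 1
--
--         for j in range(1, i - 2):
--             dp[i] = max(dp[i], dp[j] * (i - j - 1))
--
--     return dp[n]
-- ===== SOURCE B (Python) =====
-- def maxA(n: int) -> int:
--     if n <= 6: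
--         return n
--     # O(1)-state sliding window dp[i-5..i-1]: only breakpoints i-4 (x3) and i-5 (x4) matter
--     a, b, c, d, e = 2, 3, 4, 5, 6
--     for _ in range(7, n + 1):
--         a, b, c, d, e = b, c, d, e, max(e + 1, 3 * b, 4 * a)
--     return e
-- ===== Notes on version B (the rewrite author's own statement) =====
-- stated objective: faster
-- what changed: Replaces the O(n^2) DP with an inner scan over all break points by an O(n) constant-space sliding window that uses only the two relevant break points i-4 (copy x3) and i-5 (copy x4), proving that all other break points never beat them.
import Mathlib
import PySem

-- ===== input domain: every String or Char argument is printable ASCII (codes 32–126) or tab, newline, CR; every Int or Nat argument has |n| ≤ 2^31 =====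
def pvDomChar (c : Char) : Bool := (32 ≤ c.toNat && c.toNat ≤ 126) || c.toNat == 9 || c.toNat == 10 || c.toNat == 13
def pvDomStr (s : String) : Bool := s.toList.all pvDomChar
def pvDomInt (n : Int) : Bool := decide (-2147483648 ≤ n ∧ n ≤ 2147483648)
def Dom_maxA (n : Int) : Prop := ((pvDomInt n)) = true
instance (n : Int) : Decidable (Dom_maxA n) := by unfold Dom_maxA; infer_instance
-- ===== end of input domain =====

-- B replaces A's O(n^2) DP (inner scan over every break point) by an O(n) constant-space
-- sliding window using only the break points i-4 and i-5; proved to return the same value.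

-- ===== PORT A =====
-- Literal transliteration of A. In the else-branch n ≥ 7, so every list index used is
-- nonnegative and within bounds; Nat indexing via toNat/getD/set is exact there.
-- range(1,7) = List.range' 1 6, range(7,n+1) = List.range' 7 (n.toNat-6),
-- range(1,i-2) = List.range' 1 (i-3).
def maxA (n : Int) : Int :=
  if n ≤ 6 then n
  else
    let N := n.toNat
    let dp0 : List Int := List.replicate (N + 1) 0
    let dp1 := (List.range' 1 6).foldl (fun dp i => dp.set i (i : Int)) dp0
    let dp2 := (List.range' 7 (N - 6)).foldl
      (fun dp i =>
        (List.range' 1 (i - 3)).foldl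
          (fun d j => d.set i (max (d.getD i 0) (d.getD j 0 * ((i : Int) - (j : Int) - 1))))
          (dp.set i (dp.getD (i - 1) 0 + 1)))
      dp1
    dp2.getD N 0

-- ===== PORT B =====
-- Literal transliteration of B (Source B): sliding window (a,b,c,d,e) = dp[i-5..i-1].
def maxA_alt (n : Int) : Int :=
  if n ≤ 6 then n
  else
    let s := (List.range' 7 (n.toNat - 6)).foldl
      (fun (s : Int × Int × Int × Int × Int) _ =>
        (s.2.1, s.2.2.1, s.2.2.2.1, s.2.2.2.2,
          max (s.2.2.2.2 + 1) (max (3 * s.2.1) (4 * s.1))))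
      (2, 3, 4, 5, 6)
    s.2.2.2.2

-- ===== PRECONDITION & SPEC =====
def Spec_maxA (n : Int) (out : Int) : Prop := out = maxA_alt n
instance (n : Int) (out : Int) : Decidable (Spec_maxA n out) := by unfold Spec_maxA; infer_instance

-- ===== CLAIM (what is proved, stated in full; the proofs are below) =====
def Claim_equal_maxA : Prop := ∀ (n : Int), Dom_maxA n → Spec_maxA n (maxA n)

-- ===== LEMMAS AND PROOFS =====

-- The reference value sequence f: f i = best-of-A's-DP at index i, defined structurally
-- (list of values in reverse order) so that `decide` can evaluate it on literals.
def revF : Nat → List Int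
  | 0 => [0]
  | m + 1 =>
    (if m + 1 ≤ 6 then ((m : Int) + 1)
     else max ((revF m).getD 0 0 + 1)
          (max (3 * (revF m).getD 3 0) (4 * (revF m).getD 4 0))) :: revF m

def f (i : Nat) : Int := (revF i).getD 0 0

lemma revF_getD_succ (m k : Nat) : (revF (m + 1)).getD (k + 1) 0 = (revF m).getD k 0 := by
  rw [revF]; exact List.getD_cons_succ

lemma f_shift (i : Nat) : ∀ k, (revF (i + k)).getD k 0 = f i := by
  intro k
  induction k with
  | zero => rfl
  | succ k ih => rw [show i + (k+1) = (i+k) + 1 from rfl, revF_getD_succ]; exact ih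

lemma f_le6 {i : Nat} (h : i ≤ 6) : f i = (i : Int) := by
  interval_cases i <;> decide

lemma f_rec' (i : Nat) (h : 7 ≤ i) :
    f i = max (f (i-1) + 1) (max (3 * f (i-4)) (4 * f (i-5))) := by
  obtain ⟨m, rfl⟩ : ∃ m, i = m + 1 := ⟨i - 1, by omega⟩
  have h3 : (m - 3) + 3 = m := by omega
  have h4 : (m - 4) + 4 = m := by omega
  show (revF (m+1)).getD 0 0 = _
  rw [revF]
  rw [List.getD_cons_zero, if_neg (by omega)]
  have e3 : (revF m).getD 3 0 = f (m - 3) := by conv_lhs => rw [← h3]; rw [f_shift]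
  have e4 : (revF m).getD 4 0 = f (m - 4) := by conv_lhs => rw [← h4]; rw [f_shift]
  rw [e3, e4]
  rw [show m + 1 - 1 = m from rfl, show m + 1 - 4 = m - 3 by omega,
      show m + 1 - 5 = m - 4 by omega]
  rfl

lemma f_succ (i : Nat) : f i + 1 ≤ f (i + 1) := by
  by_cases h : i + 1 ≤ 6
  · rw [f_le6 (by omega : i ≤ 6), f_le6 h]; push_cast; omega
  · rw [f_rec' (i+1) (by omega), show i + 1 - 1 = i from rfl]
    exact le_max_left _ _

lemma f_add (i : Nat) : ∀ k : Nat, f i + (k : Int) ≤ f (i + k) := by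
  intro k
  induction k with
  | zero => simp
  | succ k ih =>
    have h1 := f_succ (i + k)
    rw [show i + (k + 1) = i + k + 1 from rfl]
    push_cast
    push_cast at ih
    omega

lemma f_ge (i : Nat) : (i : Int) ≤ f i := by
  have := f_add 0 i
  rw [Nat.zero_add] at this
  have h0 : f 0 = 0 := rfl
  rw [h0] at this
  simpa using this

lemma f_nonneg (i : Nat) : 0 ≤ f i := le_trans (Int.natCast_nonneg i) (f_ge i)

lemma fQ3 (i : Nat) : 3 * f i ≤ f (i + 4) := by
  by_cases h : i ≤ 2
  · rw [f_le6 (by omega : i ≤ 6), f_le6 (by omega : i + 4 ≤ 6)]; push_cast; omega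
  · rw [f_rec' (i+4) (by omega), show i + 4 - 4 = i by omega]
    exact le_max_of_le_right (le_max_left _ _)

-- for j ≥ 11 the "+1" branch of the recurrence is dominated by the copy branches
lemma fS : ∀ j, 11 ≤ j → f (j - 1) + 1 ≤ 4 * f (j - 5) := by
  intro j
  induction j using Nat.strong_induction_on with
  | _ j ih =>
    intro h
    by_cases hj : j = 11
    · subst hj; decide
    · have h12 : 12 ≤ j := by omega
      have hrec := f_rec' (j-1) (by omega)
      rw [show j - 1 - 1 = j - 2 by omega, show j - 1 - 4 = j - 5 by omega,
          show j - 1 - 5 = j - 6 by omega] at hrec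
      have hA : f (j-2) + 1 ≤ 4 * f (j-6) := by
        have := ih (j-1) (by omega) (by omega)
        rwa [show j - 1 - 1 = j - 2 by omega, show j - 1 - 5 = j - 6 by omega] at this
      have hmono : f (j-6) + 1 ≤ f (j-5) := by
        have := f_succ (j-6); rwa [show j - 6 + 1 = j - 5 by omega] at this
      have hge : (1:Int) ≤ f (j-5) := by
        have h1 : (1:Int) ≤ ((j-5 : Nat) : Int) := by exact_mod_cast (by omega : 1 ≤ j - 5)
        exact le_trans h1 (f_ge (j-5))
      rw [hrec]
      have hmax : max (f (j-2) + 1) (max (3 * f (j-5)) (4 * f (j-6))) ≤ 4 * f (j-5) - 1 := by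
        apply max_le
        · linarith
        · apply max_le
          · linarith
          · linarith
      linarith

lemma f_max2 (j : Nat) (h : 11 ≤ j) : f j = max (3 * f (j - 4)) (4 * f (j - 5)) := by
  rw [f_rec' j (by omega)]
  exact max_eq_right (le_trans (fS j h) (le_max_right _ _))

-- the key ratio bound: f grows by at least a factor 5/4 per step (off the j = 5 glitch)
lemma fP : ∀ j, (j ≤ 4 ∨ 6 ≤ j) → 5 * f j ≤ 4 * f (j + 1) := by
  intro j
  induction j using Nat.strong_induction_on with
  | _ j ih =>
    intro h
    by_cases hle : j ≤ 10
    · interval_cases j <;> first | decide | omega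
    · have h11 : 11 ≤ j := by omega
      have hm := f_max2 j h11
      have hup : 4 * f (j - 4) ≤ f (j + 1) := by
        have hr := f_rec' (j+1) (by omega)
        rw [show j + 1 - 5 = j - 4 by omega] at hr
        rw [hr]
        exact le_max_of_le_right (le_max_right _ _)
      rcases max_choice (3 * f (j-4)) (4 * f (j-5)) with hc | hc <;> rw [hm, hc]
      · linarith [f_nonneg (j-4)]
      · have hih := ih (j-5) (by omega) (Or.inr (by omega))
        rw [show j - 5 + 1 = j - 4 by omega] at hih
        linarith

-- the ratio bound the other way: f grows by at most a factor 3/2 per step (for j ≥ 2)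
lemma fT : ∀ j, 2 ≤ j → 2 * f (j + 1) ≤ 3 * f j := by
  intro j
  induction j using Nat.strong_induction_on with
  | _ j ih =>
    intro h
    by_cases hle : j ≤ 7
    · interval_cases j <;> decide
    · have hrec := f_rec' (j+1) (by omega)
      rw [show j + 1 - 1 = j from rfl, show j + 1 - 4 = j - 3 by omega,
          show j + 1 - 5 = j - 4 by omega] at hrec
      have hT := ih (j-4) (by omega) (by omega)
      rw [show j - 4 + 1 = j - 3 by omega] at hT
      have hQ : 3 * f (j-4) ≤ f j := by
        have := fQ3 (j-4); rwa [show j - 4 + 4 = j by omega] at this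
      have hj2 : (2:Int) ≤ (j:Int) := by exact_mod_cast h
      have hge : (2:Int) ≤ f j := le_trans hj2 (f_ge j)
      rw [hrec, mul_max_of_nonneg _ _ (by norm_num : (0:Int) ≤ 2),
          mul_max_of_nonneg _ _ (by norm_num : (0:Int) ≤ 2)]
      apply max_le
      · linarith
      · apply max_le
        · linarith
        · linarith [f_nonneg (j-4)]

-- main upper bound: every break point j with copy factor k = i-1-j is dominated by
-- the three-term recurrence at i = j+k+1
lemma fU : ∀ (k : Nat), ∀ (j : Nat), 2 ≤ k → 1 ≤ j → 7 ≤ j + k + 1 →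
    f j * (k : Int) ≤ max (f (j + k) + 1) (max (3 * f (j + k - 3)) (4 * f (j + k - 4))) := by
  intro k
  induction k using Nat.strong_induction_on with
  | _ k ih =>
    intro j hk hj hi
    rcases Nat.lt_or_ge k 7 with hk7 | hk7
    · interval_cases k
      · -- k = 2: i = j+3 ≥ 7, so j ≥ 4; use fT at j-1
        have hT := fT (j-1) (by omega)
        rw [show j - 1 + 1 = j by omega] at hT
        have e : j + 2 - 3 = j - 1 := by omega
        rw [e]
        have : f j * ((2:Nat) : Int) ≤ 3 * f (j-1) := by push_cast; linarith
        exact le_trans this (le_max_of_le_right (le_max_left _ _))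
      · -- k = 3
        rw [show j + 3 - 3 = j by omega]
        have : f j * ((3:Nat) : Int) ≤ 3 * f j := by push_cast; linarith
        exact le_trans this (le_max_of_le_right (le_max_left _ _))
      · -- k = 4
        rw [show j + 4 - 4 = j by omega]
        have : f j * ((4:Nat) : Int) ≤ 4 * f j := by push_cast; linarith
        exact le_trans this (le_max_of_le_right (le_max_right _ _))
      · -- k = 5
        by_cases hj5 : j = 5
        · subst hj5; decide
        · have hP := fP j (by omega)
          rw [show j + 5 - 4 = j + 1 by omega]
          have : f j * ((5:Nat) : Int) ≤ 4 * f (j+1) := by push_cast; linarith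
          exact le_trans this (le_max_of_le_right (le_max_right _ _))
      · -- k = 6
        by_cases hj4 : j = 4
        · subst hj4; decide
        by_cases hj5 : j = 5
        · subst hj5; decide
        · have hP1 := fP j (by omega)
          have hP2 := fP (j+1) (by omega)
          have h0 := f_nonneg j
          rw [show j + 6 - 4 = j + 2 by omega]
          have : f j * ((6:Nat) : Int) ≤ 4 * f (j+2) := by push_cast; linarith
          exact le_trans this (le_max_of_le_right (le_max_right _ _))
    · -- k ≥ 7: push the break point up by 4 (copy factor drops by 4) and recurse
      have hq := fQ3 j
      have h0 := f_nonneg j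
      have hkZ : (7:Int) ≤ (k:Int) := by exact_mod_cast hk7
      have h1 : f j * (k:Int) ≤ f (j+4) * ((k:Int) - 4) := by
        nlinarith [mul_nonneg h0 (by linarith : (0:Int) ≤ 2*(k:Int) - 12),
                   mul_nonneg (sub_nonneg.2 hq) (by linarith : (0:Int) ≤ (k:Int) - 4)]
      have h2 := ih (k-4) (by omega) (j+4) (by omega) (by omega) (by omega)
      rw [show j + 4 + (k - 4) = j + k by omega] at h2
      have hc : ((k - 4 : Nat) : Int) = (k:Int) - 4 := by omega
      rw [hc] at h2
      exact le_trans h1 h2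

-- generic max-fold lemmas
lemma foldl_max_le (g : Nat → Int) :
    ∀ (L : List Nat) (init M : Int), init ≤ M → (∀ j ∈ L, g j ≤ M) →
      L.foldl (fun c j => max c (g j)) init ≤ M := by
  intro L
  induction L with
  | nil => intro init M h _; simpa using h
  | cons a L ih =>
    intro init M h hall
    simp only [List.foldl_cons]
    exact ih _ _ (max_le h (hall a (by simp))) (fun j hj => hall j (by simp [hj]))

lemma foldl_max_ge_init (g : Nat → Int) :
    ∀ (L : List Nat) (init : Int), init ≤ L.foldl (fun c j => max c (g j)) init := by
  intro L
  induction L with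
  | nil => intro init; simp
  | cons a L ih =>
    intro init
    simp only [List.foldl_cons]
    exact le_trans (le_max_left _ _) (ih _)

lemma foldl_max_ge_mem (g : Nat → Int) :
    ∀ (L : List Nat) (init : Int) (j : Nat), j ∈ L →
      g j ≤ L.foldl (fun c j => max c (g j)) init := by
  intro L
  induction L with
  | nil => intro _ j h; simp at h
  | cons a L ih =>
    intro init j hj
    rcases List.mem_cons.mp hj with rfl | hj
    · simp only [List.foldl_cons]
      exact le_trans (le_max_right _ _) (foldl_max_ge_init g L _)
    · simp only [List.foldl_cons]
      exact ih _ j hj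

lemma foldl_max_congr (g1 g2 : Nat → Int) :
    ∀ (L : List Nat) (init : Int), (∀ j ∈ L, g1 j = g2 j) →
      L.foldl (fun c j => max c (g1 j)) init = L.foldl (fun c j => max c (g2 j)) init := by
  intro L
  induction L with
  | nil => intro _ _; rfl
  | cons a L ih =>
    intro init h
    simp only [List.foldl_cons]
    rw [h a (by simp)]
    exact ih _ (fun j hj => h j (by simp [hj]))

-- getD/set helpers
lemma getD_set_self (l : List Int) (i : Nat) (a : Int) (h : i < l.length) :
    (l.set i a).getD i 0 = a := by
  simp [List.getD_eq_getElem?_getD, List.getElem?_set_self h]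

lemma getD_set_ne (l : List Int) {i j : Nat} (h : i ≠ j) (a : Int) :
    (l.set i a).getD j 0 = l.getD j 0 := by
  simp [List.getD_eq_getElem?_getD, List.getElem?_set_ne h]

-- the inner loop only ever rewrites slot i; it equals a scalar max-fold written into slot i
lemma inner_fold_set (i : Nat) (dp : List Int) (hi : i < dp.length) :
    ∀ (L : List Nat), (∀ j ∈ L, j ≠ i) → ∀ (cur : Int),
      L.foldl (fun d j => d.set i (max (d.getD i 0) (d.getD j 0 * ((i : Int) - (j : Int) - 1))))
        (dp.set i cur)
      = dp.set i (L.foldl (fun c j => max c (dp.getD j 0 * ((i : Int) - (j : Int) - 1))) cur) := by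
  intro L
  induction L with
  | nil => intro _ cur; rfl
  | cons a L ih =>
    intro hne cur
    simp only [List.foldl_cons]
    have ha : a ≠ i := hne a (by simp)
    rw [getD_set_self dp i cur hi, getD_set_ne dp (Ne.symm ha) cur, List.set_set]
    exact ih (fun j hj => hne j (by simp [hj])) _

-- invariant of A's dp array
def InvA (N i : Nat) (dp : List Int) : Prop :=
  dp.length = N + 1 ∧ ∀ k, k ≤ i → dp.getD k 0 = f k

lemma outer_step (N i : Nat) (dp : List Int) (h7 : 7 ≤ i) (hiN : i ≤ N)
    (hInv : InvA N (i-1) dp) :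
    InvA N i ((List.range' 1 (i - 3)).foldl
      (fun d j => d.set i (max (d.getD i 0) (d.getD j 0 * ((i : Int) - (j : Int) - 1))))
      (dp.set i (dp.getD (i - 1) 0 + 1))) := by
  obtain ⟨hlen, hval⟩ := hInv
  have hi : i < dp.length := by omega
  have hne : ∀ j ∈ List.range' 1 (i - 3), j ≠ i := by
    intro j hj
    rw [List.mem_range'_1] at hj
    omega
  rw [inner_fold_set i dp hi _ hne _]
  refine ⟨by simpa using hlen, ?_⟩
  intro k hk
  by_cases hki : k = i
  · subst hki
    rw [getD_set_self dp k _ hi]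
    have hcongr := foldl_max_congr (fun j => dp.getD j 0 * ((k : Int) - (j : Int) - 1))
      (fun j => f j * ((k : Int) - (j : Int) - 1)) (List.range' 1 (k - 3))
      (dp.getD (k - 1) 0 + 1)
      (by
        intro j hj
        rw [List.mem_range'_1] at hj
        show dp.getD j 0 * ((k : Int) - (j : Int) - 1) = f j * ((k : Int) - (j : Int) - 1)
        rw [hval j (by omega)])
    rw [hcongr, hval (k-1) (by omega)]
    have hrec := f_rec' k h7
    apply le_antisymm
    · apply foldl_max_le
      · rw [hrec]; exact le_max_left _ _
      · intro j hj
        beta_reduce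
        rw [List.mem_range'_1] at hj
        have hU := fU (k - 1 - j) j (by omega) (by omega) (by omega)
        rw [show j + (k - 1 - j) = k - 1 by omega, show k - 1 - 3 = k - 4 by omega,
            show k - 1 - 4 = k - 5 by omega] at hU
        have hcast : ((k - 1 - j : Nat) : Int) = (k : Int) - (j : Int) - 1 := by omega
        rw [hcast] at hU
        rw [hrec]
        exact hU
    · rw [hrec]
      apply max_le
      · exact foldl_max_ge_init _ _ _
      · apply max_le
        · have hmem : (k - 4) ∈ List.range' 1 (k - 3) := by
            rw [List.mem_range'_1]; omega
          have := foldl_max_ge_mem (fun j => f j * ((k : Int) - (j : Int) - 1))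
            (List.range' 1 (k - 3)) (f (k-1) + 1) (k-4) hmem
          beta_reduce at this
          have hcast : (k : Int) - ((k - 4 : Nat) : Int) - 1 = 3 := by omega
          rw [hcast] at this
          linarith
        · have hmem : (k - 5) ∈ List.range' 1 (k - 3) := by
            rw [List.mem_range'_1]; omega
          have := foldl_max_ge_mem (fun j => f j * ((k : Int) - (j : Int) - 1))
            (List.range' 1 (k - 3)) (f (k-1) + 1) (k-5) hmem
          beta_reduce at this
          have hcast : (k : Int) - ((k - 5 : Nat) : Int) - 1 = 4 := by omega
          rw [hcast] at this
          linarith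
  · rw [getD_set_ne dp (Ne.symm hki) _]
    exact hval k (by omega)

lemma outer_fold (N : Nat) :
    ∀ (m s : Nat) (dp : List Int), 7 ≤ s → s + m - 1 ≤ N → InvA N (s-1) dp →
      InvA N (s + m - 1)
        ((List.range' s m).foldl
          (fun dp i =>
            (List.range' 1 (i - 3)).foldl
              (fun d j => d.set i (max (d.getD i 0) (d.getD j 0 * ((i : Int) - (j : Int) - 1))))
              (dp.set i (dp.getD (i - 1) 0 + 1)))
          dp) := by
  intro m
  induction m with
  | zero =>
    intro s dp h7 hN hInv
    simpa [show s + 0 - 1 = s - 1 by omega] using hInv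
  | succ m ih =>
    intro s dp h7 hN hInv
    rw [List.range'_succ]
    simp only [List.foldl_cons]
    have hstep := outer_step N s dp h7 (by omega) hInv
    have := ih (s+1) _ (by omega) (by omega) (by simpa using hstep)
    rwa [show s + 1 + m - 1 = s + (m + 1) - 1 by omega] at this

lemma init_inv (N : Nat) (h : 7 ≤ N) :
    InvA N 6 ((List.range' 1 6).foldl (fun dp i => dp.set i (i : Int))
      (List.replicate (N + 1) (0 : Int))) := by
  rw [show List.range' 1 6 = [1,2,3,4,5,6] from rfl]
  simp only [List.foldl_cons, List.foldl_nil]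
  constructor
  · simp
  · intro k hk
    have hl : (List.replicate (N + 1) (0:Int)).length = N + 1 := by simp
    interval_cases k <;>
      simp [List.getD_eq_getElem?_getD, List.getElem?_set, hl] <;>
      first
        | decide
        | (rw [if_pos (by omega)]; decide)

lemma maxA_eq_f (n : Int) (h : ¬ n ≤ 6) : maxA n = f n.toNat := by
  have hN : 7 ≤ n.toNat := by omega
  have h1 := init_inv n.toNat hN
  have h2 := outer_fold n.toNat (n.toNat - 6) 7 _ (by omega) (by omega) (by simpa using h1)
  rw [show 7 + (n.toNat - 6) - 1 = n.toNat by omega] at h2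
  show (if n ≤ 6 then n else _) = f n.toNat
  rw [if_neg h]
  exact h2.2 n.toNat le_rfl

-- B side: the window after the fold holds (f (m+q+2), …, f (m+q+6))
lemma window_fold :
    ∀ (m a q : Nat),
      (List.range' a m).foldl
        (fun (s : Int × Int × Int × Int × Int) _ =>
          (s.2.1, s.2.2.1, s.2.2.2.1, s.2.2.2.2,
            max (s.2.2.2.2 + 1) (max (3 * s.2.1) (4 * s.1))))
        (f (q+2), f (q+3), f (q+4), f (q+5), f (q+6))
      = (f (m+q+2), f (m+q+3), f (m+q+4), f (m+q+5), f (m+q+6)) := by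
  intro m
  induction m with
  | zero => intro a q; simp
  | succ m ih =>
    intro a q
    rw [List.range'_succ]
    simp only [List.foldl_cons]
    have hstep : max (f (q+6) + 1) (max (3 * f (q+3)) (4 * f (q+2))) = f (q+7) := by
      rw [f_rec' (q+7) (by omega), show q + 7 - 1 = q + 6 from rfl,
          show q + 7 - 4 = q + 3 by omega, show q + 7 - 5 = q + 2 by omega]
    show (List.range' (a+1) m).foldl _
        (f (q+3), f (q+4), f (q+5), f (q+6),
          max (f (q+6) + 1) (max (3 * f (q+3)) (4 * f (q+2)))) = _
    rw [hstep]
    have := ih (a+1) (q+1)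
    rw [show q + 1 + 2 = q + 3 by omega, show q + 1 + 3 = q + 4 by omega,
        show q + 1 + 4 = q + 5 by omega, show q + 1 + 5 = q + 6 by omega,
        show q + 1 + 6 = q + 7 by omega] at this
    rw [this]
    rw [show m + (q + 1) + 2 = m + 1 + q + 2 by omega, show m + (q + 1) + 3 = m + 1 + q + 3 by omega,
        show m + (q + 1) + 4 = m + 1 + q + 4 by omega, show m + (q + 1) + 5 = m + 1 + q + 5 by omega,
        show m + (q + 1) + 6 = m + 1 + q + 6 by omega]

lemma maxA_alt_eq_f (n : Int) (h : ¬ n ≤ 6) : maxA_alt n = f n.toNat := by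
  have hN : 7 ≤ n.toNat := by omega
  show (if n ≤ 6 then n else _) = f n.toNat
  rw [if_neg h]
  have hbase : ((2:Int), (3:Int), (4:Int), (5:Int), (6:Int))
      = (f 2, f 3, f 4, f 5, f 6) := by decide
  show ((List.range' 7 (n.toNat - 6)).foldl _ (2, 3, 4, 5, 6)).2.2.2.2 = f n.toNat
  rw [hbase]
  rw [show (f 2, f 3, f 4, f 5, f 6)
      = (f (0+2), f (0+3), f (0+4), f (0+5), f (0+6)) from rfl]
  rw [window_fold (n.toNat - 6) 7 0]
  show f (n.toNat - 6 + 0 + 6) = f n.toNat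
  rw [show n.toNat - 6 + 0 + 6 = n.toNat by omega]

-- ===== VERDICT (by name: the statement is the Claim_ definition above) =====
theorem maxA_spec : Claim_equal_maxA := by
  unfold Claim_equal_maxA Spec_maxA
  intro n _
  by_cases h : n ≤ 6
  · show (if n ≤ 6 then n else _) = (if n ≤ 6 then n else _)
    rw [if_pos h, if_pos h]
  · rw [maxA_eq_f n h, maxA_alt_eq_f n h]
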